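-- pv_equiv track=rewrite | github.com/ArturCSegat/SlaQuimica | TEST.PY | gerarMatriz
-- ===== SOURCE A (Python) =====
-- def separarComposto2(composto, prof=0, atomo=["", ""], atomos=[], nums="123456789"):
--     if prof+1 >= len(composto):
--         atomo[1] += composto[prof]
--         atomos.append(atomo)
--         return atomos
--
--     if composto[prof] in nums:
--         atomo[1] += composto[prof]
--         if composto[prof+1] not in nums:
--             atomos.append(atomo)
--             return separarComposto2(composto, prof+1, atomo=["", ""], atomos=atomos)
--         return separarComposto2(composto, prof+1, atomo=atomo, atomos=atomos)
--     else:
--         atomo[0] += composto[prof]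
--         return separarComposto2(composto, prof+1, atomo=atomo, atomos=atomos)
--
-- def gerarMatriz(r, p):
--     P = []
--     R = []
--
--     for i in p:
--         P.append(separarComposto2(i, atomo=["", ""], atomos=[]))
--     for i in r:
--         R.append(separarComposto2(i, atomo=["", ""], atomos=[]))
--
--     eq = [R, P]
--
--     return eq
-- ===== SOURCE B (Python) =====
-- # Iterative index-loop re-implementation of the recursive parser (same quirks:
-- # last char always goes into the count slot, '0' counts as a name char).
-- def _parse(c):
--     nums = "123456789"
--     atoms = []
--     cur = ["", ""]
--     n = len(c)
--     for i in range(n):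
--         ch = c[i]
--         if i + 1 == n:
--             cur[1] += ch
--             atoms.append(cur)
--         elif ch in nums:
--             cur[1] += ch
--             if c[i + 1] not in nums:
--                 atoms.append(cur)
--                 cur = ["", ""]
--         else:
--             cur[0] += ch
--     return atoms
--
-- def gerarMatriz(r, p):
--     return [[_parse(x) for x in r], [_parse(x) for x in p]]
-- ===== Notes on version B (the rewrite author's own statement) =====
-- stated objective: alternative
-- what changed: Replaced the linear recursion with accumulator arguments by one explicit loop over character indices maintaining a current atom pair and a result list, and the two append-loops of gerarMatriz by list comprehensions; Pre_ excludes inputs containing an empty string, on which A raises IndexError.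
import Mathlib
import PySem

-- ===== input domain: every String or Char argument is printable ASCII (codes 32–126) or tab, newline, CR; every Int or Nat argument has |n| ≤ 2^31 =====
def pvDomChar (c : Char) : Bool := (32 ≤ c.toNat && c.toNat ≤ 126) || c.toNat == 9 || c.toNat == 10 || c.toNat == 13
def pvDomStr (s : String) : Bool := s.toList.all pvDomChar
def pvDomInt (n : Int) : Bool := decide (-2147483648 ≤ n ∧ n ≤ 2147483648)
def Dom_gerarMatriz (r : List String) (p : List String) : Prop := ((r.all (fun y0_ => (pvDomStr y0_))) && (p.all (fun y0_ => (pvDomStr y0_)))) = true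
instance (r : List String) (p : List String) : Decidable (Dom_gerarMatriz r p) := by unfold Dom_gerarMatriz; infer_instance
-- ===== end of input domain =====

-- B rewrites the recursive compound parser as one explicit index loop (alternative decomposition, same cost); A raises IndexError on empty strings (excluded by Pre_), where B returns [].


-- ===== PORT A =====
-- Literal port of separarComposto2: recursion on prof with the atom as a pair of
-- strings (name slot, count slot). On empty composto Python raises IndexError
-- (composto[0]); that input is excluded by Pre_, the port returns atomos there.
def sepCompA (c : List Char) (prof : Nat) (atomo : String × String)
    (atomos : List (List String)) : List (List String) :=
  if h : prof + 1 ≥ c.length then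
    match getElem? c prof with
    | none => atomos      -- Python: IndexError (only reachable for c = [])
    | some ch => atomos ++ [[atomo.1, atomo.2.push ch]]
  else
    let ch := c.getD prof ' '    -- prof < c.length here, so getD is exact
    if ("123456789".toList).contains ch then
      let atomo' := (atomo.1, atomo.2.push ch)
      if ¬ ("123456789".toList).contains (c.getD (prof + 1) ' ') then
        sepCompA c (prof + 1) ("", "") (atomos ++ [[atomo'.1, atomo'.2]])
      else
        sepCompA c (prof + 1) atomo' atomos
    else
      sepCompA c (prof + 1) (atomo.1.push ch, atomo.2) atomos
termination_by c.length - prof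
decreasing_by all_goals omega

def gerarMatriz (r : List String) (p : List String) : List (List (List (List String))) :=
  let P := p.foldl (fun acc i => acc ++ [sepCompA i.toList 0 ("", "") []]) []
  let R := r.foldl (fun acc i => acc ++ [sepCompA i.toList 0 ("", "") []]) []
  [R, P]

-- ===== PORT B =====
-- Port of Source B: one step of the index loop, folded over range(len(c)).
def sepStepB (c : List Char) (st : (String × String) × List (List String)) (i : Nat) :
    (String × String) × List (List String) :=
  let cur := st.1
  let atoms := st.2
  let ch := c.getD i ' '
  if i + 1 = c.length then
    (cur, atoms ++ [[cur.1, cur.2.push ch]])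
  else if ("123456789".toList).contains ch then
    let cur' := (cur.1, cur.2.push ch)
    if ¬ ("123456789".toList).contains (c.getD (i + 1) ' ') then
      (("", ""), atoms ++ [[cur'.1, cur'.2]])
    else (cur', atoms)
  else ((cur.1.push ch, cur.2), atoms)

def sepCompB (c : List Char) : List (List String) :=
  ((List.range c.length).foldl (sepStepB c) (("", ""), [])).2

def gerarMatriz_alt (r : List String) (p : List String) : List (List (List (List String))) :=
  [r.map (fun s => sepCompB s.toList), p.map (fun s => sepCompB s.toList)]

-- ===== PRECONDITION & SPEC =====
-- Pre_ excludes inputs containing an empty compound string: there Python A raises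
-- IndexError (composto[prof] with prof = 0 on ""), so A returns no value.
def Pre_gerarMatriz (r : List String) (p : List String) : Prop :=
  (∀ s ∈ r, s ≠ "") ∧ (∀ s ∈ p, s ≠ "")
instance (r : List String) (p : List String) : Decidable (Pre_gerarMatriz r p) := by
  unfold Pre_gerarMatriz; infer_instance

def pvWitness_gerarMatriz : List String × List String := (["H2O", "O2"], ["H2O2"])

def Spec_gerarMatriz (r : List String) (p : List String) (out : List (List (List (List String)))) : Prop := out = gerarMatriz_alt r p
instance (r : List String) (p : List String) (out : List (List (List (List String)))) : Decidable (Spec_gerarMatriz r p out) := by unfold Spec_gerarMatriz; infer_instance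

-- ===== CLAIM (what is proved, stated in full; the proofs are below) =====
def Claim_equal_gerarMatriz : Prop := ∀ (r : List String) (p : List String), Dom_gerarMatriz r p → Pre_gerarMatriz r p → Spec_gerarMatriz r p (gerarMatriz r p)


-- ===== LEMMAS AND PROOFS =====

-- The index loop of B, run from position prof to the end, computes A's recursion.
theorem loop_eq_sepCompA (c : List Char) :
    ∀ (k prof : Nat) (cur : String × String) (atoms : List (List String)),
      prof + k = c.length →
      ((List.range' prof k).foldl (sepStepB c) (cur, atoms)).2 = sepCompA c prof cur atoms := by
  intro k
  induction k with
  | zero =>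
      intro prof cur atoms hpk
      rw [sepCompA]
      have : getElem? c prof = none := by
        apply List.getElem?_eq_none; omega
      simp [this, List.range']
      omega
  | succ k ih =>
      intro prof cur atoms hpk
      rw [List.range'_succ, List.foldl_cons]
      rw [sepCompA]
      have hlt : prof < c.length := by omega
      rcases Nat.eq_zero_or_pos k with hk | hk
      · -- last index
        subst hk
        have hend : prof + 1 = c.length := by omega
        have hge : prof + 1 ≥ c.length := by omega
        have hsome : getElem? c prof = some (getElem c prof hlt) :=
          List.getElem?_eq_getElem hlt
        have hstep : sepStepB c (cur, atoms) prof
            = (cur, atoms ++ [[cur.1, cur.2.push (c.getD prof ' ')]]) := by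
          simp [sepStepB, hend]
        rw [hstep]
        simp [List.range', dif_pos hge, hsome]
      · -- not the last index: same branch tests, then the induction hypothesis
        have hne : ¬ (prof + 1 = c.length) := by omega
        have hnge : ¬ (prof + 1 ≥ c.length) := by omega
        simp only [sepStepB, if_neg hne, dif_neg hnge]
        split_ifs with h1 h2
        · exact ih (prof + 1) _ _ (by omega)
        · exact ih (prof + 1) _ _ (by omega)
        · exact ih (prof + 1) _ _ (by omega)

theorem sepCompB_eq (c : List Char) : sepCompB c = sepCompA c 0 ("", "") [] := by
  unfold sepCompB
  rw [List.range_eq_range']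
  exact loop_eq_sepCompA c c.length 0 ("", "") [] (by omega)

theorem foldl_append_map (f : String → List (List String)) (l : List String) :
    ∀ acc : List (List (List String)),
      l.foldl (fun acc i => acc ++ [f i]) acc = acc ++ l.map f := by
  induction l with
  | nil => intro acc; simp
  | cons x xs ih => intro acc; simp [ih]

-- ===== VERDICT (by name: the statement is the Claim_ definition above) =====
theorem gerarMatriz_spec : Claim_equal_gerarMatriz := by
  intro r p _ _
  unfold Spec_gerarMatriz gerarMatriz gerarMatriz_alt
  simp only [foldl_append_map, List.nil_append]
  congr 1
  · exact List.map_congr_left fun s _ => (sepCompB_eq s.toList).symm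
  · simp only [List.cons.injEq, and_true]
    exact List.map_congr_left fun s _ => (sepCompB_eq s.toList).symm
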